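-- pv_equiv track=rewrite | github.com/MatDawit/UMBC-CMSC201 | Projects/project3/the_internet.py | traceroute_and_ping_rec
-- ===== SOURCE A (Python) =====
-- def traceroute_and_ping_rec(servers, start_server, end_server, visited):
--     """
--     Recursive function to determine the path from the start server to the end server.
--     :param servers: dict - The dictionary of all servers in the network.
--     :param start_server: str - The starting server name.
--     :param end_server: str - The destination server name.
--     :param visited: dict - Dictionary to track visited servers.
--     :return: list - The path from start_server to end_server if it exists.
--     """
--     path = []
--     if start_server == end_server:
--         return [end_server]
--
--     visited[start_server] = True
--
--     for next_place in servers[start_server]["connection"]: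
--         if not visited[next_place]:
--             path = traceroute_and_ping_rec(servers, next_place, end_server, visited)
--             if path:
--                 return [start_server] + path
--
--     visited[start_server] = False
--     return path
-- ===== SOURCE B (Python) =====
-- def traceroute_and_ping_rec(servers, start_server, end_server, visited):
--     if start_server == end_server:
--         return [end_server]
--     visited[start_server] = True
--     stack = [(start_server, servers[start_server]["connection"])]
--     while stack:
--         node, rem = stack[-1]
--         if rem:
--             nxt, rem = rem[0], rem[1:]
--             stack[-1] = (node, rem)
--             if not visited[nxt]:
--                 if nxt == end_server:
--                     return [n for n, _ in stack] + [end_server]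
--                 visited[nxt] = True
--                 stack.append((nxt, servers[nxt]["connection"]))
--         else:
--             visited[node] = False
--             stack.pop()
--     return []
-- ===== Notes on version B (the rewrite author's own statement) =====
-- stated objective: alternative
-- what changed: A's recursive backtracking DFS is replaced by an iterative DFS driven by an explicit stack of (node, remaining-neighbours) frames with the same visited-marking discipline, eliminating recursion entirely.
import Mathlib
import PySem

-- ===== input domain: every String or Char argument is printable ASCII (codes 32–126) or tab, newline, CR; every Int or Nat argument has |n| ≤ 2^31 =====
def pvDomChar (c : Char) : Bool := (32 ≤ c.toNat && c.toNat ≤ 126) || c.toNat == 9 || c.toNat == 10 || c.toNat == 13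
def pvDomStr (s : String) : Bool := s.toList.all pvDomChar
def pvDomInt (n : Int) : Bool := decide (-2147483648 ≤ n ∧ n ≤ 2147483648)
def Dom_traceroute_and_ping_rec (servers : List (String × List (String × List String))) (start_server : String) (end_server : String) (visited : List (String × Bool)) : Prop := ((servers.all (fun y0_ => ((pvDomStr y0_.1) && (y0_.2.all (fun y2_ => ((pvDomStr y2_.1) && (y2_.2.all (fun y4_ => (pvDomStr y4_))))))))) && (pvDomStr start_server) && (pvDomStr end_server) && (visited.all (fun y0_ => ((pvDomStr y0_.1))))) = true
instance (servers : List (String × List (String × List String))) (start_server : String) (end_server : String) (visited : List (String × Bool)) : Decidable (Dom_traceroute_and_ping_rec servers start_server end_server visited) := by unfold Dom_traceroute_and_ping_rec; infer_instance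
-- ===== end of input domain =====

-- B replaces A's recursive backtracking DFS by an iterative DFS over an explicit stack of
-- (node, remaining-neighbours) frames (objective: alternative decomposition, same cost).
-- Both Pythons mutate `visited` in the same way; the equivalence proved here is about the
-- RETURN value (the Lean ports thread the dict functionally).
-- Both ports carry a fuel counter as a pure totality guard (A's recursion depth / B's pushes
-- are bounded under Pre_; the sufficiency of the chosen fuel is proved below).

-- ===== PORT A =====
-- servers[s]["connection"] (two first-match dict lookups; none = KeyError)
def pvConn (servers : List (String × List (String × List String))) (s : String) : Option (List String) :=
  match (PySem.Dict.mk servers).get? s with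
  | none => none
  | some d => (PySem.Dict.mk d).get? "connection"

-- number of False values in the visited dict (bounds A's recursion depth; used only as fuel)
def pvCountFalse (w : PySem.Dict String Bool) : Nat :=
  w.items.countP (fun p => p.2 = false)

mutual
-- the recursive function itself: returns (path, final visited); none = KeyError or fuel out
def pvGoA (servers : List (String × List (String × List String))) (e : String) :
    Nat → String → PySem.Dict String Bool → Option (List String × PySem.Dict String Bool)
  | 0, _, _ => none
  | Nat.succ f, s, w =>
    if s = e then some ([e], w)
    else
      match pvConn servers s with
      | none => none
      | some cs => pvLoopA servers e f s cs (w.insert s true)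
termination_by f _ _ => (f, 0)

-- the for-loop over the remaining connections of s (Python's `for next_place in …`)
def pvLoopA (servers : List (String × List (String × List String))) (e : String) :
    Nat → String → List String → PySem.Dict String Bool → Option (List String × PySem.Dict String Bool)
  | _, s, [], w => some ([], w.insert s false)
  | f, s, n :: ns, w =>
    match w.get? n with
    | none => none
    | some true => pvLoopA servers e f s ns w
    | some false =>
      match pvGoA servers e f n w with
      | none => none
      | some (p, w') => if p = [] then pvLoopA servers e f s ns w' else some (s :: p, w')
termination_by f _ rem _ => (f, rem.length + 1)
end

def traceroute_and_ping_rec (servers : List (String × List (String × List String))) (start_server : String) (end_server : String) (visited : List (String × Bool)) : List String :=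
  match pvGoA servers end_server (pvCountFalse (PySem.Dict.mk visited) + 2) start_server (PySem.Dict.mk visited) with
  | some (p, _) => p
  | none => []

-- ===== PORT B =====
-- total number of connection-list entries (only used to size B's fuel)
def pvTsize (servers : List (String × List (String × List String))) : Nat :=
  (servers.map (fun p => (p.2.map (fun q => q.2.length)).sum)).sum

-- the while-loop of Source B: frames are (node, remaining neighbours), head of the list = top of stack
def pvMachine (servers : List (String × List (String × List String))) (e : String) :
    Nat → List (String × List String) → PySem.Dict String Bool → Option (List String)
  | _, [], _ => some []
  | f, (s, []) :: rest, w => pvMachine servers e f rest (w.insert s false)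
  | f, (s, n :: ns) :: rest, w =>
    match w.get? n with
    | none => none
    | some true => pvMachine servers e f ((s, ns) :: rest) w
    | some false =>
      if n = e then some ((((s, n :: ns) :: rest).map Prod.fst).reverse ++ [e])
      else
        match f with
        | 0 => none
        | Nat.succ f' =>
          match pvConn servers n with
          | none => none
          | some cs => pvMachine servers e f' ((n, cs) :: (s, ns) :: rest) (w.insert n true)
termination_by f frames _ => (f, (frames.map (fun p => p.2.length + 1)).sum)

def traceroute_and_ping_rec_alt (servers : List (String × List (String × List String))) (start_server : String) (end_server : String) (visited : List (String × Bool)) : List String :=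
  if start_server = end_server then [end_server]
  else
    match pvConn servers start_server with
    | none => []
    | some cs =>
      match pvMachine servers end_server
          ((pvTsize servers + 2) ^ (pvCountFalse (PySem.Dict.mk visited) + 3))
          [(start_server, cs)] ((PySem.Dict.mk visited).insert start_server true) with
      | some p => p
      | none => []

-- ===== PRECONDITION & SPEC =====
-- every string that occurs in some "connection" list
def pvTargets (servers : List (String × List (String × List String))) : List String :=
  servers.flatMap (fun p => ((PySem.Dict.mk p.2).get? "connection").getD [])

-- Pre_ excludes (a) association lists with duplicate keys, on which the Python dicts cannot
-- arise and assoc-list semantics is not A's; and (b) inputs whose KeyError-freedom is not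
-- globally guaranteed: it asks every connection target to be a key of `visited` (or the start)
-- and to be either the end server or a server with a "connection" list, and the start server
-- (unless it is the end) to have one too.  This is slightly narrower than "A does not raise"
-- (A may return before ever reaching a bad node), because the set of nodes A actually explores
-- is not a closed-form condition.
def Pre_traceroute_and_ping_rec (servers : List (String × List (String × List String))) (start_server : String) (end_server : String) (visited : List (String × Bool)) : Prop :=
  (visited.map Prod.fst).Nodup ∧ (servers.map Prod.fst).Nodup ∧
  (∀ p ∈ servers, (p.2.map Prod.fst).Nodup) ∧
  (start_server = end_server ∨
    ((pvConn servers start_server).isSome = true ∧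
     ∀ n ∈ pvTargets servers,
       (((PySem.Dict.mk visited).get? n).isSome = true ∨ n = start_server) ∧
       (n = end_server ∨ (pvConn servers n).isSome = true)))

instance (servers : List (String × List (String × List String))) (start_server : String) (end_server : String) (visited : List (String × Bool)) : Decidable (Pre_traceroute_and_ping_rec servers start_server end_server visited) := by
  unfold Pre_traceroute_and_ping_rec; infer_instance

def pvWitness_traceroute_and_ping_rec : (List (String × List (String × List String))) × String × String × (List (String × Bool)) :=
  ([("a", [("connection", ["b", "c"])]), ("b", [("connection", ["c"])]), ("c", [("connection", [])])],
   "a", "c", [("a", false), ("b", false), ("c", false)])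

def Spec_traceroute_and_ping_rec (servers : List (String × List (String × List String))) (start_server : String) (end_server : String) (visited : List (String × Bool)) (out : List String) : Prop := out = traceroute_and_ping_rec_alt servers start_server end_server visited
instance (servers : List (String × List (String × List String))) (start_server : String) (end_server : String) (visited : List (String × Bool)) (out : List String) : Decidable (Spec_traceroute_and_ping_rec servers start_server end_server visited out) := by unfold Spec_traceroute_and_ping_rec; infer_instance

-- ===== CLAIM (what is proved, stated in full; the proofs are below) =====
def Claim_equal_traceroute_and_ping_rec : Prop := ∀ (servers : List (String × List (String × List String))) (start_server : String) (end_server : String) (visited : List (String × Bool)), Dom_traceroute_and_ping_rec servers start_server end_server visited → Pre_traceroute_and_ping_rec servers start_server end_server visited → Spec_traceroute_and_ping_rec servers start_server end_server visited (traceroute_and_ping_rec servers start_server end_server visited)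

-- ===== LEMMAS AND PROOFS =====

theorem pv_map_id_of_ne (l : List (String × Bool)) (k : String) (v : Bool)
    (hk : ∀ p ∈ l, p.1 ≠ k) :
    l.map (fun p => if (p.1 == k) = true then (k, v) else p) = l := by
  rw [show l = l.map id by simp]
  rw [List.map_map]
  apply List.map_congr_left
  intro a ha
  simp [hk a (by simpa using ha)]

theorem pv_not_mem_map_fst (t : List (String × Bool)) (k : String)
    (h : k ∉ t.map Prod.fst) : ∀ p ∈ t, p.1 ≠ k := by
  intro p hp hpk
  exact h (by rw [← hpk]; exact List.mem_map_of_mem hp)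

theorem pv_lrep_true_le (l : List (String × Bool)) (k : String) :
    (l.map (fun p => if (p.1 == k) = true then (k, true) else p)).countP (fun p => p.2 = false)
      ≤ l.countP (fun p => p.2 = false) := by
  rw [List.countP_map]
  apply List.countP_mono_left
  intro a ha
  by_cases h : a.1 = k <;> simp [h]

theorem pv_lrep_true_eq (l : List (String × Bool)) (k : String)
    (hnd : (l.map Prod.fst).Nodup) (hmem : (k, false) ∈ l) :
    (l.map (fun p => if (p.1 == k) = true then (k, true) else p)).countP (fun p => p.2 = false) + 1
      = l.countP (fun p => p.2 = false) := by
  induction l with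
  | nil => simp at hmem
  | cons a t ih =>
    simp only [List.map_cons, List.nodup_cons] at hnd
    rcases List.mem_cons.mp hmem with h | h
    · subst h
      have hh : (fun p => if (p.1 == k) = true then (k, true) else p) ((k : String), false) = (k, true) := by simp
      simp only [List.map_cons, hh, List.countP_cons]
      rw [pv_map_id_of_ne t k true (pv_not_mem_map_fst t k hnd.1)]
      simp
    · have hak : a.1 ≠ k := by
        intro hk
        exact hnd.1 (by rw [hk]; exact List.mem_map_of_mem h)
      have hh : (fun p => if (p.1 == k) = true then (k, true) else p) a = a := by simp [hak]
      simp only [List.map_cons, hh, List.countP_cons]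
      have := ih hnd.2 h
      omega

theorem pv_lrep_false_le (l : List (String × Bool)) (k : String)
    (hnd : (l.map Prod.fst).Nodup) :
    (l.map (fun p => if (p.1 == k) = true then (k, false) else p)).countP (fun p => p.2 = false)
      ≤ l.countP (fun p => p.2 = false) + 1 := by
  induction l with
  | nil => simp
  | cons a t ih =>
    simp only [List.map_cons, List.nodup_cons] at hnd
    by_cases hak : a.1 = k
    · have hh : (fun p => if (p.1 == k) = true then (k, false) else p) a = (k, false) := by simp [hak]
      simp only [List.map_cons, hh, List.countP_cons]
      rw [pv_map_id_of_ne t k false (pv_not_mem_map_fst t k (hak ▸ hnd.1))]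
      simp
    · have hh : (fun p => if (p.1 == k) = true then (k, false) else p) a = a := by simp [hak]
      simp only [List.map_cons, hh, List.countP_cons]
      have := ih hnd.2
      omega

-- every member of a "connection" list is a pvTarget
theorem pv_cs_sub_targets (servers : List (String × List (String × List String))) (n : String)
    (cs : List String) (h : pvConn servers n = some cs) : ∀ x ∈ cs, x ∈ pvTargets servers := by
  intro x hx
  unfold pvConn at h
  rcases h1 : (PySem.Dict.mk servers).get? n with _ | d
  · rw [h1] at h; simp at h
  · rw [h1] at h; simp at h
    have hmem : (n, d) ∈ servers := PySem.Dict.mem_items_of_get?_eq_some _ h1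
    unfold pvTargets
    rw [List.mem_flatMap]
    exact ⟨(n, d), hmem, by simp [h, hx]⟩

theorem pv_cs_len_le (servers : List (String × List (String × List String))) (n : String)
    (cs : List String) (h : pvConn servers n = some cs) : cs.length ≤ pvTsize servers := by
  unfold pvConn at h
  rcases h1 : (PySem.Dict.mk servers).get? n with _ | d
  · rw [h1] at h; simp at h
  · rw [h1] at h; simp at h
    have hmem : (n, d) ∈ servers := PySem.Dict.mem_items_of_get?_eq_some _ h1
    have hmem2 : ("connection", cs) ∈ d := PySem.Dict.mem_items_of_get?_eq_some _ h
    have h2 : cs.length ≤ (d.map (fun q => q.2.length)).sum :=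
      List.le_sum_of_mem (List.mem_map_of_mem (f := fun q => q.2.length) hmem2)
    have h3 : (d.map (fun q => q.2.length)).sum ≤ pvTsize servers :=
      List.le_sum_of_mem (List.mem_map_of_mem (f := fun p => (p.2.map (fun q => q.2.length)).sum) hmem)
    omega

theorem pv_cf_pos (w : PySem.Dict String Bool) (k : String) (h : w.get? k = some false) :
    1 ≤ pvCountFalse w := by
  have hm := PySem.Dict.mem_items_of_get?_eq_some _ h
  unfold pvCountFalse
  have : 0 < w.items.countP (fun p => decide (p.2 = false)) :=
    List.countP_pos_iff.mpr ⟨(k, false), hm, by simp⟩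
  omega

theorem pv_cf_insert_true_le (w : PySem.Dict String Bool) (k : String) :
    pvCountFalse (w.insert k true) ≤ pvCountFalse w := by
  unfold pvCountFalse
  rcases hc : w.contains k with _ | _
  · rw [PySem.Dict.items_insert_of_not_contains _ _ hc]
    simp [List.countP_append]
  · rw [PySem.Dict.items_insert_of_contains _ _ hc]
    exact pv_lrep_true_le w.items k

theorem pv_cf_insert_true_eq (w : PySem.Dict String Bool) (k : String)
    (hnd : w.keys.Nodup) (h : w.get? k = some false) :
    pvCountFalse (w.insert k true) + 1 = pvCountFalse w := by
  have hm := PySem.Dict.mem_items_of_get?_eq_some _ h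
  have hc : w.contains k = true := by
    rw [PySem.Dict.contains_eq_isSome_get?, h]; rfl
  unfold pvCountFalse
  rw [PySem.Dict.items_insert_of_contains _ _ hc]
  exact pv_lrep_true_eq w.items k hnd hm

theorem pv_cf_insert_false_le (w : PySem.Dict String Bool) (k : String) (hnd : w.keys.Nodup) :
    pvCountFalse (w.insert k false) ≤ pvCountFalse w + 1 := by
  unfold pvCountFalse
  rcases hc : w.contains k with _ | _
  · rw [PySem.Dict.items_insert_of_not_contains _ _ hc]
    simp [List.countP_append]
  · rw [PySem.Dict.items_insert_of_contains _ _ hc]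
    exact pv_lrep_false_le w.items k hnd

theorem pv_isSome_insert (w : PySem.Dict String Bool) (k : String) (v : Bool) (j : String)
    (hk : (w.get? k).isSome = true) :
    ((w.insert k v).get? j).isSome = (w.get? j).isSome := by
  rw [PySem.Dict.get?_insert]
  by_cases hj : j = k
  · simp [hj, hk]
  · simp [hj]

-- sufficiency of the fuel for A's recursion, plus the invariants on the threaded dict
mutual
theorem pvGS (servers : List (String × List (String × List String))) (e : String)
    (f : Nat) (n : String) (w : PySem.Dict String Bool)
    (hT1 : ∀ m ∈ pvTargets servers, m = e ∨ (pvConn servers m).isSome = true)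
    (hT2 : ∀ m ∈ pvTargets servers, (w.get? m).isSome = true)
    (hnd : w.keys.Nodup)
    (hn : w.get? n = some false)
    (hcn : n = e ∨ (pvConn servers n).isSome = true)
    (hf : pvCountFalse w ≤ f) :
    ∃ p w', pvGoA servers e f n w = some (p, w') ∧
      (∀ m, ((w'.get? m).isSome) = ((w.get? m).isSome)) ∧ w'.keys.Nodup ∧
      pvCountFalse w' ≤ pvCountFalse w := by
  have h1 : 1 ≤ pvCountFalse w := pv_cf_pos w n hn
  cases f with
  | zero => omega
  | succ f' =>
    by_cases hne : n = e
    · refine ⟨[e], w, ?_, fun m => rfl, hnd, le_refl _⟩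
      rw [pvGoA]
      simp [hne]
    · rcases hcn with hcn | hcn
      · exact absurd hcn hne
      obtain ⟨cs, hcs⟩ := Option.isSome_iff_exists.mp hcn
      have hT2' : ∀ m ∈ pvTargets servers, ((w.insert n true).get? m).isSome = true := by
        intro m hm
        rw [pv_isSome_insert w n true m (by rw [hn]; rfl)]
        exact hT2 m hm
      have hnd1 : (w.insert n true).keys.Nodup := PySem.Dict.nodup_keys_insert w n true hnd
      have hs1 : ((w.insert n true).get? n).isSome = true := by
        rw [PySem.Dict.get?_insert_self]; rfl
      have hcf1 : pvCountFalse (w.insert n true) + 1 = pvCountFalse w :=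
        pv_cf_insert_true_eq w n hnd hn
      obtain ⟨p, w', hL, hk, hnd', hcf'⟩ :=
        pvLS servers e f' n cs (w.insert n true) hT1 hT2'
          (pv_cs_sub_targets servers n cs hcs) hnd1 hs1 (by omega)
      refine ⟨p, w', ?_, ?_, hnd', by omega⟩
      · rw [pvGoA]
        simp only [if_neg hne, hcs]
        exact hL
      · intro m
        rw [hk m, pv_isSome_insert w n true m (by rw [hn]; rfl)]
termination_by (f, 0)

theorem pvLS (servers : List (String × List (String × List String))) (e : String)
    (f : Nat) (s : String) (rem : List String) (w : PySem.Dict String Bool)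
    (hT1 : ∀ m ∈ pvTargets servers, m = e ∨ (pvConn servers m).isSome = true)
    (hT2 : ∀ m ∈ pvTargets servers, (w.get? m).isSome = true)
    (hrem : ∀ m ∈ rem, m ∈ pvTargets servers)
    (hnd : w.keys.Nodup)
    (hs : (w.get? s).isSome = true)
    (hf : pvCountFalse w ≤ f) :
    ∃ p w', pvLoopA servers e f s rem w = some (p, w') ∧
      (∀ m, ((w'.get? m).isSome) = ((w.get? m).isSome)) ∧ w'.keys.Nodup ∧
      pvCountFalse w' ≤ pvCountFalse w + 1 := by
  cases rem with
  | nil =>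
    refine ⟨[], w.insert s false, ?_, fun m => pv_isSome_insert w s false m hs,
      PySem.Dict.nodup_keys_insert w s false hnd, pv_cf_insert_false_le w s hnd⟩
    rw [pvLoopA]
  | cons n ns =>
    have hnT : n ∈ pvTargets servers := hrem n (List.mem_cons_self)
    obtain ⟨b, hb⟩ := Option.isSome_iff_exists.mp (hT2 n hnT)
    cases b with
    | true =>
      obtain ⟨p, w', hL, hk, hnd', hcf'⟩ :=
        pvLS servers e f s ns w hT1 hT2 (fun m hm => hrem m (List.mem_cons_of_mem n hm)) hnd hs hf
      refine ⟨p, w', ?_, hk, hnd', hcf'⟩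
      rw [pvLoopA, hb]
      exact hL
    | false =>
      obtain ⟨q, w'', hgo, hk2, hnd2, hcf2⟩ :=
        pvGS servers e f n w hT1 hT2 hnd hb (hT1 n hnT) hf
      cases q with
      | nil =>
        obtain ⟨p, w', hL, hk, hnd', hcf'⟩ :=
          pvLS servers e f s ns w'' hT1
            (fun m hm => by rw [hk2 m]; exact hT2 m hm)
            (fun m hm => hrem m (List.mem_cons_of_mem n hm)) hnd2
            (by rw [hk2 s]; exact hs) (le_trans hcf2 hf)
        refine ⟨p, w', ?_, fun m => by rw [hk m, hk2 m], hnd', by omega⟩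
        rw [pvLoopA, hb, hgo]
        simpa using hL
      | cons qh qt =>
        refine ⟨s :: qh :: qt, w'', ?_, hk2, hnd2, by omega⟩
        rw [pvLoopA, hb, hgo]
        simp
termination_by (f, rem.length + 1)
end


theorem pvM_skip (servers : List (String × List (String × List String))) (e : String) (f : Nat)
    (s n : String) (ns : List String) (rest : List (String × List String))
    (w : PySem.Dict String Bool) (hb : w.get? n = some true) :
    pvMachine servers e f ((s, n :: ns) :: rest) w = pvMachine servers e f ((s, ns) :: rest) w := by
  rw [pvMachine.eq_def]
  simp [hb]

theorem pvM_end (servers : List (String × List (String × List String))) (e : String) (f : Nat)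
    (s n : String) (ns : List String) (rest : List (String × List String))
    (w : PySem.Dict String Bool) (hb : w.get? n = some false) (hne : n = e) :
    pvMachine servers e f ((s, n :: ns) :: rest) w
      = some (((rest.map Prod.fst).reverse ++ [s]) ++ [e]) := by
  subst hne
  rw [pvMachine.eq_def]
  simp [hb]

theorem pvM_push (servers : List (String × List (String × List String))) (e : String) (f : Nat)
    (s n : String) (ns : List String) (rest : List (String × List String))
    (w : PySem.Dict String Bool) (cs : List String)
    (hb : w.get? n = some false) (hne : ¬ n = e) (hcs : pvConn servers n = some cs) :
    pvMachine servers e (f + 1) ((s, n :: ns) :: rest) w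
      = pvMachine servers e f ((n, cs) :: (s, ns) :: rest) (w.insert n true) := by
  rw [pvMachine.eq_def]
  simp [hb, hne, hcs]

theorem pvM_nil (servers : List (String × List (String × List String))) (e : String) (f : Nat)
    (w : PySem.Dict String Bool) :
    pvMachine servers e f ([] : List (String × List String)) w = some [] := by
  rw [pvMachine.eq_def]

theorem pvM_pop (servers : List (String × List (String × List String))) (e : String) (f : Nat)
    (s : String) (rest : List (String × List String)) (w : PySem.Dict String Bool) :
    pvMachine servers e f ((s, ([] : List String)) :: rest) w
      = pvMachine servers e f rest (w.insert s false) := by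
  rw [pvMachine.eq_def]

-- the machine simulates the recursion: c is the number of pushes the failed/successful part takes
theorem pvSIM (servers : List (String × List (String × List String))) (e : String)
    (fA : Nat) (s : String) (rem : List String) (w : PySem.Dict String Bool)
    (p : List String) (w' : PySem.Dict String Bool) (rest : List (String × List String))
    (h : pvLoopA servers e fA s rem w = some (p, w')) :
    ∃ c, c ≤ rem.length * (pvTsize servers + 2) ^ fA ∧ ∀ f',
      pvMachine servers e (c + f') ((s, rem) :: rest) w =
        if p = [] then pvMachine servers e f' rest w'
        else some ((rest.map Prod.fst).reverse ++ p) := by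
  induction fA using Nat.strongRecOn generalizing s rem w p w' rest with
  | ind fA IH =>
  induction rem generalizing w p w' rest with
  | nil =>
    rw [pvLoopA] at h
    simp only [Option.some.injEq, Prod.mk.injEq] at h
    obtain ⟨hp, hw⟩ := h
    refine ⟨0, by simp, fun f' => ?_⟩
    rw [Nat.zero_add, pvM_pop servers e f' s rest w, hw, if_pos hp.symm]
  | cons n ns ihrem =>
    rw [pvLoopA] at h
    cases hb : w.get? n with
    | none => rw [hb] at h; exact absurd h (by simp)
    | some b =>
      rw [hb] at h
      cases b with
      | true =>
        have h' : pvLoopA servers e fA s ns w = some (p, w') := h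
        obtain ⟨c, hc, hrun⟩ := ihrem w p w' rest h'
        refine ⟨c, ?_, fun f' => ?_⟩
        · simp only [List.length_cons]
          have hx : (ns.length + 1) * (pvTsize servers + 2) ^ fA
              = ns.length * (pvTsize servers + 2) ^ fA + (pvTsize servers + 2) ^ fA := by ring
          omega
        · rw [pvM_skip servers e (c + f') s n ns rest w hb]
          exact hrun f'
      | false =>
        cases fA with
        | zero =>
          rw [show pvGoA servers e 0 n w = none from by rw [pvGoA]] at h
          exact absurd h (by simp)
        | succ fa =>
          have hX : 1 ≤ (pvTsize servers + 2) ^ fa := Nat.one_le_pow _ _ (by omega)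
          have hpow : (pvTsize servers + 2) ^ (fa + 1)
              = (pvTsize servers + 2) ^ fa * (pvTsize servers + 2) := pow_succ _ _
          by_cases hne : n = e
          · have hgo : pvGoA servers e (fa + 1) n w = some ([e], w) := by
              rw [pvGoA]; simp [hne]
            rw [hgo] at h
            have h' : some (s :: [e], w) = some (p, w') := h
            simp only [Option.some.injEq, Prod.mk.injEq] at h'
            obtain ⟨hp, hw⟩ := h'
            refine ⟨0, Nat.zero_le _, fun f' => ?_⟩
            rw [Nat.zero_add, pvM_end servers e f' s n ns rest w hb hne, ← hp]
            simp [List.append_assoc]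
          · cases hcs : pvConn servers n with
            | none =>
              rw [show pvGoA servers e (fa + 1) n w = none from by
                rw [pvGoA]; simp [hne, hcs]] at h
              exact absurd h (by simp)
            | some cs =>
              have hcsle : cs.length ≤ pvTsize servers := pv_cs_len_le servers n cs hcs
              have hgo : pvGoA servers e (fa + 1) n w
                  = pvLoopA servers e fa n cs (w.insert n true) := by
                rw [pvGoA]; simp [hne, hcs]
              rw [hgo] at h
              cases hin : pvLoopA servers e fa n cs (w.insert n true) with
              | none => rw [hin] at h; exact absurd h (by simp)
              | some qw =>
                obtain ⟨q, w''⟩ := qw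
                rw [hin] at h
                obtain ⟨c1, hc1, hrun1⟩ :=
                  IH fa (by omega) n cs (w.insert n true) q w'' ((s, ns) :: rest) hin
                have h5 : c1 + 1 ≤ (pvTsize servers + 2) ^ (fa + 1) := by
                  rw [hpow]; nlinarith
                cases q with
                | nil =>
                  have h' : pvLoopA servers e (fa + 1) s ns w'' = some (p, w') := h
                  obtain ⟨c2, hc2, hrun2⟩ := ihrem w'' p w' rest h'
                  refine ⟨c1 + c2 + 1, ?_, fun f' => ?_⟩
                  · simp only [List.length_cons]
                    have hx : (ns.length + 1) * (pvTsize servers + 2) ^ (fa + 1)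
                        = ns.length * (pvTsize servers + 2) ^ (fa + 1)
                          + (pvTsize servers + 2) ^ (fa + 1) := by ring
                    omega
                  · have harr : c1 + c2 + 1 + f' = ((c1 + (c2 + f')) : Nat) + 1 := by omega
                    rw [harr, pvM_push servers e (c1 + (c2 + f')) s n ns rest w cs hb hne hcs]
                    have hm1 := hrun1 (c2 + f')
                    rw [if_pos rfl] at hm1
                    exact hm1.trans (hrun2 f')
                | cons qh qt =>
                  have h' : some (s :: qh :: qt, w'') = some (p, w') := h
                  simp only [Option.some.injEq, Prod.mk.injEq] at h'
                  obtain ⟨hp, hw⟩ := h'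
                  refine ⟨c1 + 1, ?_, fun f' => ?_⟩
                  · simp only [List.length_cons]
                    have hx : (ns.length + 1) * (pvTsize servers + 2) ^ (fa + 1)
                        = ns.length * (pvTsize servers + 2) ^ (fa + 1)
                          + (pvTsize servers + 2) ^ (fa + 1) := by ring
                    omega
                  · have harr : c1 + 1 + f' = ((c1 + f') : Nat) + 1 := by omega
                    rw [harr, pvM_push servers e (c1 + f') s n ns rest w cs hb hne hcs]
                    have hm1 := hrun1 f'
                    rw [if_neg (by simp)] at hm1
                    rw [hm1, ← hp]
                    simp [List.append_assoc]

-- ===== VERDICT (by name: the statement is the Claim_ definition above) =====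
theorem traceroute_and_ping_rec_spec : Claim_equal_traceroute_and_ping_rec := by
  unfold Claim_equal_traceroute_and_ping_rec
  intro servers start e visited _dom hpre
  unfold Spec_traceroute_and_ping_rec
  obtain ⟨hndv, _hnds, _hndd, hmain⟩ := hpre
  have hndw : (PySem.Dict.mk visited).keys.Nodup := by
    rw [PySem.Dict.keys_mk]; exact hndv
  by_cases hse : start = e
  · have hgo : pvGoA servers e (pvCountFalse (PySem.Dict.mk visited) + 2) start (PySem.Dict.mk visited)
        = some ([e], PySem.Dict.mk visited) := by
      rw [show pvCountFalse (PySem.Dict.mk visited) + 2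
            = (pvCountFalse (PySem.Dict.mk visited) + 1) + 1 from rfl, pvGoA]
      simp [hse]
    unfold traceroute_and_ping_rec traceroute_and_ping_rec_alt
    rw [hgo, if_pos hse]
  · rcases hmain with h | ⟨hconn, hgood⟩
    · exact absurd h hse
    obtain ⟨cs, hcs⟩ := Option.isSome_iff_exists.mp hconn
    have hT1 : ∀ m ∈ pvTargets servers, m = e ∨ (pvConn servers m).isSome = true :=
      fun m hm => (hgood m hm).2
    have hT2 : ∀ m ∈ pvTargets servers,
        (((PySem.Dict.mk visited).insert start true).get? m).isSome = true := by
      intro m hm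
      rw [PySem.Dict.get?_insert]
      rcases (hgood m hm).1 with hv | hv
      · by_cases hmk : m = start
        · simp [hmk]
        · simp only [if_neg hmk]; exact hv
      · simp [hv]
    have hnd1 : ((PySem.Dict.mk visited).insert start true).keys.Nodup :=
      PySem.Dict.nodup_keys_insert _ _ _ hndw
    have hs1 : (((PySem.Dict.mk visited).insert start true).get? start).isSome = true := by
      rw [PySem.Dict.get?_insert_self]; rfl
    have hcf1 : pvCountFalse ((PySem.Dict.mk visited).insert start true)
        ≤ pvCountFalse (PySem.Dict.mk visited) := pv_cf_insert_true_le _ start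
    obtain ⟨p, w', hL, _, _, _⟩ :=
      pvLS servers e (pvCountFalse (PySem.Dict.mk visited) + 1) start cs
        ((PySem.Dict.mk visited).insert start true) hT1 hT2
        (pv_cs_sub_targets servers start cs hcs) hnd1 hs1 (by omega)
    have hA : traceroute_and_ping_rec servers start e visited = p := by
      unfold traceroute_and_ping_rec
      rw [show pvCountFalse (PySem.Dict.mk visited) + 2
            = (pvCountFalse (PySem.Dict.mk visited) + 1) + 1 from rfl, pvGoA]
      simp [hse, hcs, hL]
    obtain ⟨c, hcb, hrun⟩ :=
      pvSIM servers e (pvCountFalse (PySem.Dict.mk visited) + 1) start cs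
        ((PySem.Dict.mk visited).insert start true) p w' [] hL
    have hcbound : c ≤ (pvTsize servers + 2) ^ (pvCountFalse (PySem.Dict.mk visited) + 3) := by
      have h1 : cs.length ≤ pvTsize servers := pv_cs_len_le servers start cs hcs
      calc c ≤ cs.length * (pvTsize servers + 2) ^ (pvCountFalse (PySem.Dict.mk visited) + 1) := hcb
        _ ≤ (pvTsize servers + 2) * (pvTsize servers + 2) ^ (pvCountFalse (PySem.Dict.mk visited) + 1) :=
            Nat.mul_le_mul_right _ (by omega)
        _ = (pvTsize servers + 2) ^ (pvCountFalse (PySem.Dict.mk visited) + 2) := by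
            rw [pow_succ]; ring
        _ ≤ (pvTsize servers + 2) ^ (pvCountFalse (PySem.Dict.mk visited) + 3) :=
            Nat.pow_le_pow_right (by omega) (by omega)
    have hfb := hrun ((pvTsize servers + 2) ^ (pvCountFalse (PySem.Dict.mk visited) + 3) - c)
    rw [Nat.add_sub_cancel' hcbound] at hfb
    have hB : traceroute_and_ping_rec_alt servers start e visited = p := by
      unfold traceroute_and_ping_rec_alt
      rw [if_neg hse, hcs]
      show (match pvMachine servers e
          ((pvTsize servers + 2) ^ (pvCountFalse (PySem.Dict.mk visited) + 3))
          [(start, cs)] ((PySem.Dict.mk visited).insert start true) with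
        | some p => p
        | none => []) = p
      rw [hfb]
      cases p with
      | nil => rw [if_pos rfl, pvM_nil]
      | cons ph pt => simp
    rw [hA, hB]
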